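-- pv_equiv track=rewrite | github.com/kouroshkbs-source/garmin-to-notion | sync.py | format_training_message
-- ===== SOURCE A (Python) =====
-- def format_training_message(message):
--     if not message:
--         return "Unknown"
--     messages = {
--         'NO_': 'No Benefit',
--         'MINOR_': 'Some Benefit',
--         'RECOVERY_': 'Recovery',
--         'MAINTAINING_': 'Maintaining',
--         'IMPROVING_': 'Impacting',
--         'IMPACTING_': 'Impacting',
--         'HIGHLY_': 'Highly Impacting',
--         'OVERREACHING_': 'Overreaching'
--     }
--     for key, value in messages.items():
--         if message.startswith(key):
--             return value
--     return message
-- ===== SOURCE B (Python) =====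
-- def format_training_message(message):
--     if not message:
--         return "Unknown"
--     messages = {
--         'NO_': 'No Benefit',
--         'MINOR_': 'Some Benefit',
--         'RECOVERY_': 'Recovery',
--         'MAINTAINING_': 'Maintaining',
--         'IMPROVING_': 'Impacting',
--         'IMPACTING_': 'Impacting',
--         'HIGHLY_': 'Highly Impacting',
--         'OVERREACHING_': 'Overreaching'
--     }
--     idx = message.find('_')
--     if idx == -1:
--         return message
--     return messages.get(message[:idx + 1], message)
-- ===== Notes on version B (the rewrite author's own statement) =====
-- stated objective: simpler
-- what changed: Replaces the linear scan of eight startswith tests with computing the first-underscore position once and doing a single dict lookup on the computed prefix key.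
import Mathlib
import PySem

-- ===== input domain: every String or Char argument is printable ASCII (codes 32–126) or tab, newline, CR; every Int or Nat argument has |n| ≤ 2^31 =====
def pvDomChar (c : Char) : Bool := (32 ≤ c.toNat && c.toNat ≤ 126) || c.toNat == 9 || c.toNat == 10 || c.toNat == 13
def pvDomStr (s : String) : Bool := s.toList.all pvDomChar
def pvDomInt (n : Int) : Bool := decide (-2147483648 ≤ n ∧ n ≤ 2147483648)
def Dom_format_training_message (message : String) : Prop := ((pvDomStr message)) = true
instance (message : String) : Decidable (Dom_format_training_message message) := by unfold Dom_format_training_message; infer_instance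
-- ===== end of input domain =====

-- B replaces A's sequential startswith scan with a single computed first-underscore
-- prefix key looked up once in the dict (objective: simpler).


-- ===== PORT A =====
-- the dict literal shared (verbatim) by both Pythons
def ftmMessages : PySem.Dict String String := PySem.Dict.ofList
  [("NO_", "No Benefit"), ("MINOR_", "Some Benefit"), ("RECOVERY_", "Recovery"),
   ("MAINTAINING_", "Maintaining"), ("IMPROVING_", "Impacting"), ("IMPACTING_", "Impacting"),
   ("HIGHLY_", "Highly Impacting"), ("OVERREACHING_", "Overreaching")]

-- the 'for key, value in messages.items(): if message.startswith(key): return value' loop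
def ftmLoop (message : String) : List (String × String) → Option String
  | [] => none
  | (k, v) :: rest =>
      if PySem.Str.startswith message k then some v else ftmLoop message rest

def format_training_message (message : String) : String :=
  if message = "" then "Unknown"
  else
    match ftmLoop message ftmMessages.items with
    | some v => v
    | none => message

-- ===== PORT B =====
def format_training_message_alt (message : String) : String :=
  if message = "" then "Unknown"
  else
    let idx := PySem.Str.find message "_"
    if idx = -1 then message
    else PySem.Dict.getD ftmMessages (PySem.Str.slice message none (some (idx + 1))) message

-- ===== PRECONDITION & SPEC =====
def Spec_format_training_message (message : String) (out : String) : Prop := out = format_training_message_alt message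
instance (message : String) (out : String) : Decidable (Spec_format_training_message message out) := by unfold Spec_format_training_message; infer_instance

-- ===== CLAIM (what is proved, stated in full; the proofs are below) =====
def Claim_equal_format_training_message : Prop := ∀ (message : String), Dom_format_training_message message → Spec_format_training_message message (format_training_message message)

-- ===== LEMMAS AND PROOFS =====

-- If the message has no underscore, no key (each ends in '_') is a prefix.
lemma no_underscore_no_prefix (l k : List Char)
    (hf : PySem.Chars.find l ['_'] = -1) : ¬ (k ++ ['_'] <+: l) := by
  intro h
  have hmem : '_' ∈ l := h.subset (by simp)
  have : ['_'] <:+: l := by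
    rcases List.mem_iff_append.mp hmem with ⟨s, t, rfl⟩
    exact ⟨s, t, by simp⟩
  exact (PySem.Chars.find_eq_neg_one_iff l ['_']).mp hf this

-- With the first underscore at position f, a key k++['_'] with no '_' in k is a
-- prefix of l iff it equals l.take (f+1) — the bridge between A's test and B's key.
lemma key_prefix_iff_take (l k : List Char) (hk : '_' ∉ k)
    (hf : 0 ≤ PySem.Chars.find l ['_']) :
    (k ++ ['_'] <+: l) ↔ l.take ((PySem.Chars.find l ['_']).toNat + 1) = k ++ ['_'] := by
  obtain ⟨hpre, hmin⟩ := PySem.Chars.find_spec (s := l) (sub := ['_']) hf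
  set f := (PySem.Chars.find l ['_']).toNat with hfdef
  constructor
  · intro h
    obtain ⟨t, rfl⟩ := h
    have hfle : f ≤ k.length := by
      by_contra hgt
      push Not at hgt
      exact hmin k.length hgt ⟨t, by simp⟩
    have hfeq : f = k.length := by
      rcases Nat.lt_or_ge f k.length with hlt | hge
      · exfalso
        obtain ⟨t', ht'⟩ := hpre
        have hdrop : (((k ++ ['_']) ++ t).drop f) = '_' :: t' := ht'.symm ▸ rfl
        have hk' : ((k ++ ['_']) ++ t)[f]? = some '_' := by
          rw [← List.head?_drop, hdrop]; rfl
        have hkf : k[f]? = some '_' := by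
          rw [List.append_assoc] at hk'
          rwa [List.getElem?_append_left hlt] at hk'
        exact hk (List.mem_of_getElem? hkf)
      · omega
    rw [hfeq]
    rw [show k.length + 1 = (k ++ ['_']).length by simp]
    exact (List.prefix_iff_eq_take.mp ⟨t, rfl⟩).symm
  · intro h
    exact h ▸ List.take_prefix _ l

-- evaluate B's getD on the literal dict as an if-chain
lemma getD_ftmMessages (key dflt : String) :
    PySem.Dict.getD ftmMessages key dflt =
      if ("NO_" : String) = key then "No Benefit"
      else if ("MINOR_" : String) = key then "Some Benefit"
      else if ("RECOVERY_" : String) = key then "Recovery"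
      else if ("MAINTAINING_" : String) = key then "Maintaining"
      else if ("IMPROVING_" : String) = key then "Impacting"
      else if ("IMPACTING_" : String) = key then "Impacting"
      else if ("HIGHLY_" : String) = key then "Highly Impacting"
      else if ("OVERREACHING_" : String) = key then "Overreaching"
      else dflt := by
  have h : ftmMessages = PySem.Dict.mk
    [("NO_", "No Benefit"), ("MINOR_", "Some Benefit"), ("RECOVERY_", "Recovery"),
     ("MAINTAINING_", "Maintaining"), ("IMPROVING_", "Impacting"), ("IMPACTING_", "Impacting"),
     ("HIGHLY_", "Highly Impacting"), ("OVERREACHING_", "Overreaching")] := by rfl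
  rw [h, PySem.Dict.getD_eq_get?_getD]
  simp only [PySem.Dict.get?_mk_cons, beq_iff_eq]
  split_ifs <;> rfl

theorem format_training_message_spec' (message : String) :
    format_training_message message = format_training_message_alt message := by
  unfold format_training_message format_training_message_alt
  by_cases hempty : message = ""
  · simp [hempty]
  · simp only [hempty, if_false]
    have hitems : ftmMessages.items =
      [("NO_", "No Benefit"), ("MINOR_", "Some Benefit"), ("RECOVERY_", "Recovery"),
       ("MAINTAINING_", "Maintaining"), ("IMPROVING_", "Impacting"), ("IMPACTING_", "Impacting"),
       ("HIGHLY_", "Highly Impacting"), ("OVERREACHING_", "Overreaching")] := by rfl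
    have hfind : PySem.Str.find message "_" = PySem.Chars.find message.toList ['_'] := by
      have h1 : ("_" : String).toList = ['_'] := by decide
      rw [PySem.Str.find_eq, h1]
    by_cases hneg : PySem.Chars.find message.toList ['_'] = -1
    · -- no underscore: every startswith fails, both sides return message
      have hsw : ∀ k : List Char, PySem.Str.startswith message (String.ofList (k ++ ['_'])) = false := by
        intro k
        rw [← Bool.not_eq_true, PySem.Str.startswith_eq, PySem.Chars.startswith_iff]
        simpa using no_underscore_no_prefix message.toList k hneg
      rw [hfind, if_pos hneg, hitems]
      simp only [ftmLoop,
        show ("NO_" : String) = String.ofList (['N','O'] ++ ['_']) from rfl,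
        show ("MINOR_" : String) = String.ofList (['M','I','N','O','R'] ++ ['_']) from rfl,
        show ("RECOVERY_" : String) = String.ofList (['R','E','C','O','V','E','R','Y'] ++ ['_']) from rfl,
        show ("MAINTAINING_" : String) = String.ofList (['M','A','I','N','T','A','I','N','I','N','G'] ++ ['_']) from rfl,
        show ("IMPROVING_" : String) = String.ofList (['I','M','P','R','O','V','I','N','G'] ++ ['_']) from rfl,
        show ("IMPACTING_" : String) = String.ofList (['I','M','P','A','C','T','I','N','G'] ++ ['_']) from rfl,
        show ("HIGHLY_" : String) = String.ofList (['H','I','G','H','L','Y'] ++ ['_']) from rfl,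
        show ("OVERREACHING_" : String) = String.ofList (['O','V','E','R','R','E','A','C','H','I','N','G'] ++ ['_']) from rfl,
        hsw, Bool.false_eq_true, if_false]
    · -- underscore present at f ≥ 0
      have hf : 0 ≤ PySem.Chars.find message.toList ['_'] := by
        have := PySem.Chars.neg_one_le_find message.toList ['_']
        omega
      rw [hfind, if_neg hneg]
      have hkey : (PySem.Str.slice message none (some (PySem.Chars.find message.toList ['_'] + 1))).toList
          = message.toList.take ((PySem.Chars.find message.toList ['_']).toNat + 1) := by
        rw [PySem.Str.toList_slice, PySem.Chars.slice_eq_listSlice,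
            PySem.List.slice_to _ (by omega)]
        congr 1
        omega
      rw [getD_ftmMessages]
      have cond : ∀ k : List Char, '_' ∉ k →
          (PySem.Str.startswith message (String.ofList (k ++ ['_'])) = true ↔
            String.ofList (k ++ ['_']) =
              PySem.Str.slice message none (some (PySem.Chars.find message.toList ['_'] + 1))) := by
        intro k hk
        rw [PySem.Str.startswith_eq, PySem.Chars.startswith_iff, eq_comm,
            ← String.toList_inj, hkey]
        simp only [String.toList_ofList]
        exact key_prefix_iff_take message.toList k hk hf
      rw [hitems]
      simp only [ftmLoop,
        show ("NO_" : String) = String.ofList (['N','O'] ++ ['_']) from rfl,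
        show ("MINOR_" : String) = String.ofList (['M','I','N','O','R'] ++ ['_']) from rfl,
        show ("RECOVERY_" : String) = String.ofList (['R','E','C','O','V','E','R','Y'] ++ ['_']) from rfl,
        show ("MAINTAINING_" : String) = String.ofList (['M','A','I','N','T','A','I','N','I','N','G'] ++ ['_']) from rfl,
        show ("IMPROVING_" : String) = String.ofList (['I','M','P','R','O','V','I','N','G'] ++ ['_']) from rfl,
        show ("IMPACTING_" : String) = String.ofList (['I','M','P','A','C','T','I','N','G'] ++ ['_']) from rfl,
        show ("HIGHLY_" : String) = String.ofList (['H','I','G','H','L','Y'] ++ ['_']) from rfl,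
        show ("OVERREACHING_" : String) = String.ofList (['O','V','E','R','R','E','A','C','H','I','N','G'] ++ ['_']) from rfl,
        cond (['N','O']) (by decide), cond (['M','I','N','O','R']) (by decide),
        cond (['R','E','C','O','V','E','R','Y']) (by decide),
        cond (['M','A','I','N','T','A','I','N','I','N','G']) (by decide),
        cond (['I','M','P','R','O','V','I','N','G']) (by decide),
        cond (['I','M','P','A','C','T','I','N','G']) (by decide),
        cond (['H','I','G','H','L','Y']) (by decide),
        cond (['O','V','E','R','R','E','A','C','H','I','N','G']) (by decide)]
      split_ifs <;> rfl

-- ===== VERDICT (by name: the statement is the Claim_ definition above) =====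
theorem format_training_message_spec : Claim_equal_format_training_message := by
  intro message _
  exact format_training_message_spec' message
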